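-- pv_equiv track=rewrite | github.com/Potato0705/DimASQP | sweep_predict.py | _split_list_tokens
-- ===== SOURCE A (Python) =====
-- from typing import Any, Dict, Iterator, List, Optional, Sequence, Tuple
--
-- def _split_list_tokens(tokens: Optional[Sequence[str]]) -> List[str]:
--     """
--     Accept tokens list that may be:
--       - ["0.1,0.2,0.3"]
--       - ["0.1", "0.2", "0.3"]
--       - ["0.1,0.2", "0.3"]
--     """
--     if not tokens:
--         return []
--     parts: List[str] = []
--     for t in tokens:
--         s = str(t).strip()
--         if not s:
--             continue
--         s = s.replace(",", " ")
--         parts.extend([x for x in s.split() if x])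
--     return parts
-- ===== SOURCE B (Python) =====
-- from typing import List, Optional, Sequence
--
--
-- def _split_list_tokens(tokens: Optional[Sequence[str]]) -> List[str]:
--     if not tokens:
--         return []
--     return " ".join(str(t) for t in tokens).replace(",", " ").split()
-- ===== Notes on version B (the rewrite author's own statement) =====
-- stated objective: simpler
-- what changed: Replaces the per-token strip/skip/replace/split-and-extend loop by a single join-replace-split pipeline over one concatenated string, doing one C-level split instead of per-token Python-level list building.
import Mathlib
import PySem

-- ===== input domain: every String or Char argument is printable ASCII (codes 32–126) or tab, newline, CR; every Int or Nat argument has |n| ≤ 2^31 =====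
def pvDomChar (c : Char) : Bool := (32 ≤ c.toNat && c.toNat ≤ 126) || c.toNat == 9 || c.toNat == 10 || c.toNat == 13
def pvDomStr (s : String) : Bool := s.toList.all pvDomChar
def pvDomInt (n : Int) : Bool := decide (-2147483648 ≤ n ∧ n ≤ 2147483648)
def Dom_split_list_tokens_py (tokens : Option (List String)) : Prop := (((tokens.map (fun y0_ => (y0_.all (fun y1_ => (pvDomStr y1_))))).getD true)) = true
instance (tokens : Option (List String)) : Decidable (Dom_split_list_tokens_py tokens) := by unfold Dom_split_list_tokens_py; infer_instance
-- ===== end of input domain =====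

-- B replaces A's per-token strip/skip/replace/split-and-extend loop by one join-replace-split
-- pipeline over a single concatenated string (objective: simpler).

-- ===== PORT A =====
def split_list_tokens_py (tokens : Option (List String)) : List String :=
  match tokens with
  | none => []
  | some ts =>
    if ts.isEmpty then []
    else
      ts.foldl (fun parts t =>
        let s := PySem.Str.strip t
        if s = "" then parts
        else
          let s2 := PySem.Str.replace s "," " "
          parts ++ (PySem.Str.split₀ s2).filter (fun x => x != "")) []

-- ===== PORT B =====
def split_list_tokens_py_alt (tokens : Option (List String)) : List String :=
  match tokens with
  | none => []
  | some ts =>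
    if ts.isEmpty then []
    else PySem.Str.split₀ (PySem.Str.replace (PySem.Str.join " " ts) "," " ")

-- ===== PRECONDITION & SPEC =====
def Spec_split_list_tokens_py (tokens : Option (List String)) (out : List String) : Prop := out = split_list_tokens_py_alt tokens
instance (tokens : Option (List String)) (out : List String) : Decidable (Spec_split_list_tokens_py tokens out) := by unfold Spec_split_list_tokens_py; infer_instance

-- ===== CLAIM (what is proved, stated in full; the proofs are below) =====
def Claim_equal_split_list_tokens_py : Prop := ∀ (tokens : Option (List String)), Dom_split_list_tokens_py tokens → Spec_split_list_tokens_py tokens (split_list_tokens_py tokens)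

-- ===== LEMMAS AND PROOFS =====

-- the comma→space substitution, as a character map
def pvFc (c : Char) : Char := if c = ',' then ' ' else c

theorem pvFc_of_isspace {c : Char} (h : PySem.Chars.isspace c = true) : pvFc c = c := by
  unfold pvFc
  split
  · rename_i hc; subst hc; simp [PySem.Chars.isspace] at h
  · rfl

-- single-char replace is a map
theorem replace_go_eq_map (s : List Char) : ∀ (fuel : Nat) (acc : List Char), s.length ≤ fuel →
    PySem.Chars.replace.go [','] [' '] fuel s acc = acc.reverse ++ s.map pvFc := by
  induction s with
  | nil =>
    intro fuel acc _
    cases fuel <;> simp [PySem.Chars.replace.go]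
  | cons c t ih =>
    intro fuel acc hle
    cases fuel with
    | zero => simp at hle
    | succ f =>
      by_cases hc : c = ','
      · subst hc
        have : List.isPrefixOf [','] (',' :: t) = true := by simp [List.isPrefixOf]
        simp only [PySem.Chars.replace.go, this, if_pos]
        rw [show List.drop [','].length (',' :: t) = t from rfl,
          show ([' '].reverse ++ acc) = ' ' :: acc from rfl,
          ih f (' ' :: acc) (by simpa using hle)]
        simp [pvFc]
      · have : List.isPrefixOf [','] (c :: t) = false := by
          simp [List.isPrefixOf]; exact fun h => (hc h.symm).elim
        simp only [PySem.Chars.replace.go, this]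
        rw [ih f (c :: acc) (by simpa using hle)]
        simp [pvFc, hc]

theorem replace_eq_map (s : List Char) : PySem.Chars.replace s [','] [' '] = s.map pvFc := by
  unfold PySem.Chars.replace
  simp only [List.isEmpty_iff, reduceCtorEq, if_false]
  simpa using replace_go_eq_map s s.length [] le_rfl

-- accumulator lemma for split₀.go
theorem split_go_acc (s : List Char) : ∀ (cur : List Char) (acc : List (List Char)),
    PySem.Chars.split₀.go s cur acc = acc.reverse ++ PySem.Chars.split₀.go s cur [] := by
  induction s with
  | nil =>
    intro cur acc
    by_cases h : cur.isEmpty <;> simp [PySem.Chars.split₀.go, h]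
  | cons c t ih =>
    intro cur acc
    by_cases hsp : PySem.Chars.isspace c = true
    · by_cases hcur : cur.isEmpty = true
      · simp only [PySem.Chars.split₀.go, hsp, hcur, if_pos]
        rw [ih [] acc]
      · rw [Bool.not_eq_true] at *; simp only [PySem.Chars.split₀.go, hsp, if_pos, hcur, Bool.false_eq_true, if_false]
        rw [ih [] (cur.reverse :: acc), ih [] [cur.reverse]]
        simp
    · rw [Bool.not_eq_true] at *; simp only [PySem.Chars.split₀.go, hsp, Bool.false_eq_true, Bool.false_eq_true, if_false]
      rw [ih (c :: cur) acc]

-- splitting at an explicit space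
theorem split_go_append_space (b : List Char) (a : List Char) : ∀ (cur : List Char) (acc : List (List Char)),
    PySem.Chars.split₀.go (a ++ ' ' :: b) cur acc =
      PySem.Chars.split₀.go b [] ((PySem.Chars.split₀.go a cur acc).reverse) := by
  induction a with
  | nil =>
    intro cur acc
    have hsp : PySem.Chars.isspace ' ' = true := by decide
    by_cases hcur : cur.isEmpty = true
    · simp [PySem.Chars.split₀.go, hsp, hcur]
    · simp [PySem.Chars.split₀.go, hsp, hcur]
  | cons c t ih =>
    intro cur acc
    by_cases hsp : PySem.Chars.isspace c = true
    · by_cases hcur : cur.isEmpty = true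
      · simp only [List.cons_append, PySem.Chars.split₀.go, hsp, hcur, if_pos]
        exact ih [] acc
      · rw [Bool.not_eq_true] at *; simp only [List.cons_append, PySem.Chars.split₀.go, hsp, if_pos, hcur, Bool.false_eq_true, if_false]
        exact ih [] (cur.reverse :: acc)
    · rw [Bool.not_eq_true] at *; simp only [List.cons_append, PySem.Chars.split₀.go, hsp, Bool.false_eq_true, Bool.false_eq_true, if_false]
      exact ih (c :: cur) acc

theorem split₀_append_space (a b : List Char) :
    PySem.Chars.split₀ (a ++ ' ' :: b) = PySem.Chars.split₀ a ++ PySem.Chars.split₀ b := by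
  unfold PySem.Chars.split₀
  rw [split_go_append_space, split_go_acc]
  simp

-- all-whitespace input behaves like the empty input
theorem split_go_allspace (w : List Char) (hw : ∀ c ∈ w, PySem.Chars.isspace c = true) :
    ∀ (cur : List Char) (acc : List (List Char)),
      PySem.Chars.split₀.go w cur acc = PySem.Chars.split₀.go [] cur acc := by
  induction w with
  | nil => intro cur acc; rfl
  | cons c t ih =>
    intro cur acc
    have hc : PySem.Chars.isspace c = true := hw c (List.mem_cons_self)
    have ht : ∀ x ∈ t, PySem.Chars.isspace x = true := fun x hx => hw x (List.mem_cons_of_mem _ hx)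
    by_cases hcur : cur.isEmpty = true
    · simp only [PySem.Chars.split₀.go, hc, hcur, if_pos]
      rw [ih ht [] acc]
      simp [PySem.Chars.split₀.go]
    · rw [Bool.not_eq_true] at *; simp only [PySem.Chars.split₀.go, hc, if_pos, hcur, Bool.false_eq_true, if_false]
      rw [ih ht [] (cur.reverse :: acc)]
      simp [PySem.Chars.split₀.go]

theorem split_go_append_allspace (w : List Char) (hw : ∀ c ∈ w, PySem.Chars.isspace c = true)
    (u : List Char) : ∀ (cur : List Char) (acc : List (List Char)),
    PySem.Chars.split₀.go (u ++ w) cur acc = PySem.Chars.split₀.go u cur acc := by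
  induction u with
  | nil => intro cur acc; simpa using split_go_allspace w hw cur acc
  | cons c t ih =>
    intro cur acc
    by_cases hsp : PySem.Chars.isspace c = true
    · by_cases hcur : cur.isEmpty = true
      · simp only [List.cons_append, PySem.Chars.split₀.go, hsp, hcur, if_pos]; exact ih [] acc
      · rw [Bool.not_eq_true] at *; simp only [List.cons_append, PySem.Chars.split₀.go, hsp, if_pos, hcur, Bool.false_eq_true, if_false]
        exact ih [] (cur.reverse :: acc)
    · rw [Bool.not_eq_true] at *; simp only [List.cons_append, PySem.Chars.split₀.go, hsp, Bool.false_eq_true, Bool.false_eq_true, if_false]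
      exact ih (c :: cur) acc

theorem split₀_append_allspace (u w : List Char) (hw : ∀ c ∈ w, PySem.Chars.isspace c = true) :
    PySem.Chars.split₀ (u ++ w) = PySem.Chars.split₀ u := by
  unfold PySem.Chars.split₀; exact split_go_append_allspace w hw u [] []

theorem split₀_allspace_append (w u : List Char) (hw : ∀ c ∈ w, PySem.Chars.isspace c = true) :
    PySem.Chars.split₀ (w ++ u) = PySem.Chars.split₀ u := by
  induction w with
  | nil => rfl
  | cons c t ih =>
    have hc : PySem.Chars.isspace c = true := hw c (List.mem_cons_self)
    have ht : ∀ x ∈ t, PySem.Chars.isspace x = true := fun x hx => hw x (List.mem_cons_of_mem _ hx)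
    unfold PySem.Chars.split₀ at *
    simpa [PySem.Chars.split₀.go, hc] using ih ht

-- stripping a token does not change its word list (after the comma map)
theorem split₀_map_strip (s : List Char) :
    PySem.Chars.split₀ ((PySem.Chars.strip s).map pvFc) = PySem.Chars.split₀ (s.map pvFc) := by
  have hdecomp : s = s.takeWhile PySem.Chars.isspace ++ PySem.Chars.lstrip s := by
    simp [PySem.Chars.lstrip]
  set ls := PySem.Chars.lstrip s with hls
  have hdecomp2 : ls = PySem.Chars.strip s ++ (ls.reverse.takeWhile PySem.Chars.isspace).reverse := by
    have h1 : ls.reverse.takeWhile PySem.Chars.isspace ++ ls.reverse.dropWhile PySem.Chars.isspace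
        = ls.reverse := List.takeWhile_append_dropWhile
    have h2 := congrArg List.reverse h1
    simp only [List.reverse_append, List.reverse_reverse] at h2
    simp only [PySem.Chars.strip, PySem.Chars.rstrip, ← hls]
    exact h2.symm
  have hw1 : ∀ c ∈ (s.takeWhile PySem.Chars.isspace).map pvFc, PySem.Chars.isspace c = true := by
    intro c hc
    obtain ⟨d, hd, rfl⟩ := List.mem_map.mp hc
    have := List.mem_takeWhile_imp hd
    rw [pvFc_of_isspace this]; exact this
  have hw2 : ∀ c ∈ ((ls.reverse.takeWhile PySem.Chars.isspace).reverse).map pvFc,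
      PySem.Chars.isspace c = true := by
    intro c hc
    obtain ⟨d, hd, rfl⟩ := List.mem_map.mp hc
    have := List.mem_takeWhile_imp (List.mem_reverse.mp hd)
    rw [pvFc_of_isspace this]; exact this
  conv_rhs => rw [hdecomp]
  rw [List.map_append, split₀_allspace_append _ _ hw1]
  conv_rhs => rw [hdecomp2]
  rw [List.map_append, split₀_append_allspace _ _ hw2]

-- split₀ never yields an empty piece
theorem split_go_ne_nil (s : List Char) : ∀ (cur : List Char) (acc : List (List Char)),
    (∀ p ∈ acc, p ≠ []) → ∀ p ∈ PySem.Chars.split₀.go s cur acc, p ≠ [] := by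
  induction s with
  | nil =>
    intro cur acc hacc p hp
    by_cases hcur : cur.isEmpty = true
    · simp only [PySem.Chars.split₀.go, hcur, if_pos] at hp
      exact hacc p (List.mem_reverse.mp hp)
    · rw [Bool.not_eq_true] at *; simp only [PySem.Chars.split₀.go, hcur, Bool.false_eq_true, if_false] at hp
      rcases List.mem_cons.mp (List.mem_reverse.mp hp) with h | h
      · subst h; simp_all
      · exact hacc p h
  | cons c t ih =>
    intro cur acc hacc p hp
    by_cases hsp : PySem.Chars.isspace c = true
    · by_cases hcur : cur.isEmpty = true
      · simp only [PySem.Chars.split₀.go, hsp, hcur, if_pos] at hp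
        exact ih [] acc hacc p hp
      · rw [Bool.not_eq_true] at *; simp only [PySem.Chars.split₀.go, hsp, if_pos, hcur, Bool.false_eq_true, if_false] at hp
        refine ih [] (cur.reverse :: acc) ?_ p hp
        intro q hq
        rcases List.mem_cons.mp hq with h | h
        · subst h; simp_all
        · exact hacc q h
    · rw [Bool.not_eq_true] at *; simp only [PySem.Chars.split₀.go, hsp, Bool.false_eq_true, Bool.false_eq_true, if_false] at hp
      exact ih (c :: cur) acc hacc p hp

theorem split₀_ne_nil (s : List Char) : ∀ p ∈ PySem.Chars.split₀ s, p ≠ [] :=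
  split_go_ne_nil s [] [] (by simp)

-- the word list contributed by one token
def pvG (t : String) : List (List Char) := PySem.Chars.split₀ (t.toList.map pvFc)

theorem str_filter_split (x : String) :
    List.map String.toList ((PySem.Str.split₀ x).filter (fun p => p != "")) =
      PySem.Chars.split₀ x.toList := by
  rw [List.filter_eq_self.mpr, PySem.Str.split₀_map_toList]
  intro p hp
  have : p.toList ∈ PySem.Chars.split₀ x.toList := by
    rw [← PySem.Str.split₀_map_toList]; exact List.mem_map_of_mem hp
  have hne := split₀_ne_nil x.toList p.toList this
  simp only [bne_iff_ne, ne_eq]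
  intro h; subst h; exact hne rfl

theorem step_eq (parts : List String) (t : String) :
    List.map String.toList
      (if PySem.Str.strip t = "" then parts
       else parts ++ (PySem.Str.split₀ (PySem.Str.replace (PySem.Str.strip t) "," " ")).filter
            (fun x => x != "")) = List.map String.toList parts ++ pvG t := by
  have hrep : (PySem.Str.replace (PySem.Str.strip t) "," " ").toList
      = (PySem.Chars.strip t.toList).map pvFc := by
    rw [PySem.Str.toList_replace, PySem.Str.toList_strip]
    exact replace_eq_map _
  by_cases h : PySem.Str.strip t = ""
  · have hstrip : PySem.Chars.strip t.toList = [] := by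
      rw [← PySem.Str.toList_strip, h]; rfl
    have : pvG t = [] := by
      unfold pvG
      rw [← split₀_map_strip, hstrip]
      rfl
    simp [h, this]
  · rw [if_neg h, List.map_append, str_filter_split, hrep, split₀_map_strip]
    rfl

theorem fold_eq (ts : List String) : ∀ (parts : List String),
    List.map String.toList
      (ts.foldl (fun parts t =>
        let s := PySem.Str.strip t
        if s = "" then parts
        else
          let s2 := PySem.Str.replace s "," " "
          parts ++ (PySem.Str.split₀ s2).filter (fun x => x != "")) parts)
      = List.map String.toList parts ++ ts.flatMap pvG := by
  induction ts with
  | nil => intro parts; simp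
  | cons t rest ih =>
    intro parts
    simp only [List.foldl_cons, List.flatMap_cons]
    rw [ih, step_eq]
    simp

theorem join_split (ts : List (List Char)) :
    PySem.Chars.split₀ ((PySem.Chars.join [' '] ts).map pvFc)
      = ts.flatMap (fun t => PySem.Chars.split₀ (t.map pvFc)) := by
  induction ts with
  | nil => simp [PySem.Chars.join, List.intercalate]; rfl
  | cons a rest ih =>
    cases rest with
    | nil => simp [PySem.Chars.join, List.intercalate]
    | cons b l =>
      have hinter : PySem.Chars.join [' '] (a :: b :: l)
          = a ++ ' ' :: PySem.Chars.join [' '] (b :: l) := by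
        simp [PySem.Chars.join, List.intercalate, List.intersperse]
      rw [hinter, List.map_append, List.map_cons]
      have : pvFc ' ' = ' ' := by decide
      rw [this, split₀_append_space, ih]
      simp

theorem alt_eq (ts : List String) :
    List.map String.toList (PySem.Str.split₀ (PySem.Str.replace (PySem.Str.join " " ts) "," " "))
      = ts.flatMap pvG := by
  rw [PySem.Str.split₀_map_toList, PySem.Str.toList_replace, PySem.Str.toList_join,
    show ("," : String).toList = [','] from rfl, show (" " : String).toList = [' '] from rfl,
    replace_eq_map, join_split, List.flatMap_map]
  rfl

-- ===== VERDICT (by name: the statement is the Claim_ definition above) =====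
theorem split_list_tokens_py_spec : Claim_equal_split_list_tokens_py := by
  intro tokens _
  unfold Spec_split_list_tokens_py split_list_tokens_py split_list_tokens_py_alt
  match tokens with
  | none => rfl
  | some ts =>
    by_cases h : ts.isEmpty
    · simp [h]
    · rw [Bool.not_eq_true] at *; simp only [h, Bool.false_eq_true, Bool.false_eq_true, if_false]
      apply List.map_injective_iff.mpr (fun a b hab => String.toList_inj.mp hab)
      rw [alt_eq, fold_eq]
      simp
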